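-- pv_equiv track=rewrite | github.com/ITMO-NSS-team/ProtoLLM | protollm/docs_processing/splitting/utilities.py | fix_list_dots_separators
-- ===== SOURCE A (Python) =====
-- def fix_list_dots_separators(sentences: list[str]) -> list[str]:
--     """
--        Takes list of sentences and combines those of them that are list items
--        that were incorrectly separated due to the use of a dot separator.
--        Returns updated list of sentences
--     """
--     fixed_sentences_lst = []
--     sentence_parts_lst = []
--     i = 0
--     while i < len(sentences):
--         chunk = sentences[i].strip()
--         if len(chunk) > 0:
--             # it means that the dot was used to separate list elements, and we should join such sentences
--             if not chunk[0].isupper() and not chunk[0].isdigit():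
--                 sentence_parts_lst.append(chunk)
--             else:
--                 if len(sentence_parts_lst) != 0:
--                     fixed_sentences_lst.append('; '.join(sentence_parts_lst))
--                 sentence_parts_lst = [chunk]
--         i += 1
--
--     if len(sentence_parts_lst) != 0:
--         fixed_sentences_lst.append('; '.join(sentence_parts_lst))
--     return fixed_sentences_lst
-- ===== SOURCE B (Python) =====
-- def fix_list_dots_separators(sentences: list[str]) -> list[str]:
--     """Same result as A: built back-to-front from a pre-filtered chunk list."""
--     chunks = [c for c in (s.strip() for s in sentences) if c]
--     out = []
--     cur = []
--     for c in reversed(chunks):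
--         cur.append(c)
--         if c[0].isupper() or c[0].isdigit():
--             out.append('; '.join(reversed(cur)))
--             cur = []
--     if cur:
--         out.append('; '.join(reversed(cur)))
--     out.reverse()
--     return out
-- ===== Notes on version B (the rewrite author's own statement) =====
-- stated objective: alternative
-- what changed: B first filters the stripped non-empty chunks into one list, then builds the groups back-to-front in a single reverse pass that closes a group whenever a chunk starts with an upper-case letter or digit, instead of A's forward loop carrying a pending-parts accumulator that it flushes on each boundary and again after the loop.
import Mathlib
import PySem

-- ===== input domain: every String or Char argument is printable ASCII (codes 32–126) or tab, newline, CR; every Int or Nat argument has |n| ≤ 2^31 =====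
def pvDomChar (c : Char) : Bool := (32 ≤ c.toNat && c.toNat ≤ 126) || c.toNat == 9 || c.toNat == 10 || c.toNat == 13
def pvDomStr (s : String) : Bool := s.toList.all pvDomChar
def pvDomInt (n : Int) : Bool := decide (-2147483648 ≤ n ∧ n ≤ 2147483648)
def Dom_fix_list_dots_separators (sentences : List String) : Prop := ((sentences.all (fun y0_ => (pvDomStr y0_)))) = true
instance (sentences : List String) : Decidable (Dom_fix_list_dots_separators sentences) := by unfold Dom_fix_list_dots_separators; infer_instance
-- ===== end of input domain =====

-- B rebuilds the result back-to-front over a pre-filtered chunk list (one reverse pass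
-- closing a group at each upper/digit-initial chunk) instead of A's forward state machine;
-- objective: alternative (same asymptotic cost, different traversal).

-- ===== PORT A =====
-- A's loop body: state = (fixed_sentences_lst, sentence_parts_lst)
def pvStepA (st : List String × List String) (s : String) : List String × List String :=
  let chunk := PySem.Str.strip s
  if PySem.Str.len chunk > 0 then
    let c0 := chunk.toList.headD ' '   -- chunk[0]; the guard above makes it in range
    if !PySem.Chars.isupper c0 && !PySem.Chars.isdigit c0 then
      (st.1, st.2 ++ [chunk])
    else
      ((if st.2 ≠ [] then st.1 ++ [PySem.Str.join "; " st.2] else st.1), [chunk])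
  else st

def fix_list_dots_separators (sentences : List String) : List String :=
  let st := sentences.foldl pvStepA ([], [])
  if st.2 ≠ [] then st.1 ++ [PySem.Str.join "; " st.2] else st.1

-- ===== PORT B =====
-- a chunk that starts a new group (chunks are nonempty by construction)
def pvIsBoundary (c : String) : Bool :=
  PySem.Chars.isupper (c.toList.headD ' ') || PySem.Chars.isdigit (c.toList.headD ' ')

-- [c for c in (s.strip() for s in sentences) if c]
def pvChunksB (sentences : List String) : List String :=
  sentences.filterMap (fun s =>
    let c := PySem.Str.strip s
    if c = "" then none else some c)

-- the reversed-loop body: state = (out, cur), both accumulated in reverse by appends;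
-- 'for c in reversed(chunks)' is a foldl over chunks.reverse
def pvStepB2 (st : List String × List String) (c : String) : List String × List String :=
  let cur := st.2 ++ [c]
  if pvIsBoundary c then (st.1 ++ [PySem.Str.join "; " cur.reverse], []) else (st.1, cur)

def fix_list_dots_separators_alt (sentences : List String) : List String :=
  let st := (pvChunksB sentences).reverse.foldl pvStepB2 ([], [])
  (if st.2 ≠ [] then st.1 ++ [PySem.Str.join "; " st.2.reverse] else st.1).reverse

-- ===== PRECONDITION & SPEC =====
def Spec_fix_list_dots_separators (sentences : List String) (out : List String) : Prop := out = fix_list_dots_separators_alt sentences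
instance (sentences : List String) (out : List String) : Decidable (Spec_fix_list_dots_separators sentences out) := by unfold Spec_fix_list_dots_separators; infer_instance

-- ===== CLAIM (what is proved, stated in full; the proofs are below) =====
def Claim_equal_fix_list_dots_separators : Prop := ∀ (sentences : List String), Dom_fix_list_dots_separators sentences → Spec_fix_list_dots_separators sentences (fix_list_dots_separators sentences)

-- ===== LEMMAS AND PROOFS =====

-- proof-side view of B's reversed loop: the same groups built front-to-back by prepends
def pvStepB (c : String) (st : List String × List String) : List String × List String :=
  let cur := c :: st.2
  if pvIsBoundary c then (PySem.Str.join "; " cur :: st.1, []) else (st.1, cur)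

-- B's foldl over the reversed list is the prepend-version foldr, componentwise reversed
theorem pvB2_eq (l : List String) :
    l.reverse.foldl pvStepB2 ([], []) =
      ((l.foldr pvStepB ([], [])).1.reverse, (l.foldr pvStepB ([], [])).2.reverse) := by
  rw [List.foldl_reverse]
  induction l with
  | nil => simp
  | cons c t ih =>
    simp only [List.foldr_cons, ih]
    rcases h : t.foldr pvStepB ([], []) with ⟨out, cur⟩
    rw [h] at ih
    by_cases hb : pvIsBoundary c <;> simp [pvStepB, pvStepB2, hb]

-- A's loop body restricted to a (nonempty) chunk
def pvStepChunk (st : List String × List String) (c : String) : List String × List String :=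
  if !pvIsBoundary c then (st.1, st.2 ++ [c])
  else ((if st.2 ≠ [] then st.1 ++ [PySem.Str.join "; " st.2] else st.1), [c])

-- A's final flush
def pvFinA (st : List String × List String) : List String :=
  if st.2 ≠ [] then st.1 ++ [PySem.Str.join "; " st.2] else st.1

-- bridge for the B-state: pending parts on the left of the still-open group
def pvF (parts : List String) (st : List String × List String) : List String :=
  if parts ++ st.2 = [] then st.1 else PySem.Str.join "; " (parts ++ st.2) :: st.1

theorem pvStepA_eq (st : List String × List String) (s : String) :
    pvStepA st s = if PySem.Str.strip s = "" then st else pvStepChunk st (PySem.Str.strip s) := by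
  unfold pvStepA pvStepChunk pvIsBoundary PySem.Str.len
  by_cases h : PySem.Str.strip s = ""
  · simp [h]
  · have hne : (PySem.Str.strip s).toList ≠ [] := fun hn =>
      h (by cases hs : PySem.Str.strip s; simpa [hs] using hn)
    have hl : 0 < (PySem.Chars.strip s.toList).length := by
      rw [← PySem.Str.toList_strip]; exact List.length_pos_iff.mpr hne
    simp [h, hl, Bool.not_or]

theorem pvFoldA_eq_foldChunks (sentences : List String) (st : List String × List String) :
    sentences.foldl pvStepA st = (pvChunksB sentences).foldl pvStepChunk st := by
  induction sentences generalizing st with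
  | nil => simp [pvChunksB]
  | cons s t ih =>
    simp only [List.foldl_cons, pvChunksB, List.filterMap_cons]
    by_cases h : PySem.Str.strip s = ""
    · simp only [h, if_pos, pvStepA_eq, pvChunksB] at ih ⊢
      exact ih st
    · simp only [h, pvStepA_eq, if_false, pvChunksB, List.foldl_cons] at ih ⊢
      exact ih _

theorem pvMain (l : List String) (fixed parts : List String) :
    pvFinA (l.foldl pvStepChunk (fixed, parts)) = fixed ++ pvF parts (l.foldr pvStepB ([], [])) := by
  induction l generalizing fixed parts with
  | nil =>
    cases parts <;> simp [pvFinA, pvF]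
  | cons c t ih =>
    simp only [List.foldl_cons, List.foldr_cons]
    by_cases hb : pvIsBoundary c
    · rw [show pvStepChunk (fixed, parts) c
          = ((if parts ≠ [] then fixed ++ [PySem.Str.join "; " parts] else fixed), [c]) by
        simp [pvStepChunk, hb]]
      rw [ih]
      rcases h : t.foldr pvStepB ([], []) with ⟨out, cur⟩
      simp only [pvStepB, hb, if_pos, pvF]
      cases parts <;> simp
    · rw [show pvStepChunk (fixed, parts) c = (fixed, parts ++ [c]) by simp [pvStepChunk, hb]]
      rw [ih]
      rcases h : t.foldr pvStepB ([], []) with ⟨out, cur⟩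
      simp [pvStepB, hb, pvF]

-- ===== VERDICT (by name: the statement is the Claim_ definition above) =====
theorem fix_list_dots_separators_spec : Claim_equal_fix_list_dots_separators := by
  intro sentences _
  unfold Spec_fix_list_dots_separators fix_list_dots_separators fix_list_dots_separators_alt
  rw [pvFoldA_eq_foldChunks, pvB2_eq]
  have h := pvMain (pvChunksB sentences) [] []
  rcases hf : (pvChunksB sentences).foldr pvStepB ([], []) with ⟨out, cur⟩
  rw [hf] at h
  simp only [pvFinA] at h
  rw [h]
  cases cur <;> simp [pvF]
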